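-- pv_equiv track=rewrite | github.com/fau-klue/empirist-corpus | baselines/baseline_surface.py | lemmatize_file
-- ===== SOURCE A (Python) =====
-- def lemmatize_file(f):
--     total, sur, norm, nw, sur_nc, norm_nc, nw_nc, nl = 0, 0, 0, 0, 0, 0, 0, 0
--     for line in f:
--         line = line.rstrip()
--         if line == "":
--             continue
--         if line.startswith("<") and line.endswith(">"):
--             continue
--         if line.endswith("\tCLARIFY"):
--             line = line[:-8]
--         word, pos, udpos, norm_word, sur_lemma, norm_lemma = line.split("\t")
--         total += 1
--         if word.lower() == sur_lemma.lower():
--             sur_nc += 1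
--         if word == sur_lemma:
--             sur += 1
--         if word.lower() == norm_lemma.lower():
--             norm_nc += 1
--         if word == norm_lemma:
--             norm += 1
--         if word.lower() == norm_word.lower():
--             nw_nc += 1
--         if word == norm_word:
--             nw += 1
--         if norm_word == norm_lemma:
--             nl += 1
--     return total, sur, norm, nw, sur_nc, norm_nc, nw_nc, nl
-- ===== SOURCE B (Python) =====
-- def lemmatize_file(f):
--     # Pass 1: parse the surviving lines into 6-field records.
--     records = []
--     for line in f:
--         line = line.rstrip()
--         if line == "":
--             continue
--         if line.startswith("<") and line.endswith(">"):
--             continue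
--         if line.endswith("\tCLARIFY"):
--             line = line[:-8]
--         word, pos, udpos, norm_word, sur_lemma, norm_lemma = line.split("\t")
--         records.append((word, norm_word, sur_lemma, norm_lemma))
--     # Pass 2: each statistic is an independent sum over the record list.
--     return (
--         len(records),
--         sum(1 for w, nw, sl, nl in records if w == sl),
--         sum(1 for w, nw, sl, nl in records if w == nl),
--         sum(1 for w, nw, sl, nl in records if w == nw),
--         sum(1 for w, nw, sl, nl in records if w.lower() == sl.lower()),
--         sum(1 for w, nw, sl, nl in records if w.lower() == nl.lower()),
--         sum(1 for w, nw, sl, nl in records if w.lower() == nw.lower()),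
--         sum(1 for w, nw, sl, nl in records if nw == nl),
--     )
-- ===== Notes on version B (the rewrite author's own statement) =====
-- stated objective: alternative
-- what changed: A interleaves parsing and counting in one loop over eight running accumulators; B first collects the parsed records in one pass and then computes each of the eight statistics as an independent count over that record list.
import Mathlib
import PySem

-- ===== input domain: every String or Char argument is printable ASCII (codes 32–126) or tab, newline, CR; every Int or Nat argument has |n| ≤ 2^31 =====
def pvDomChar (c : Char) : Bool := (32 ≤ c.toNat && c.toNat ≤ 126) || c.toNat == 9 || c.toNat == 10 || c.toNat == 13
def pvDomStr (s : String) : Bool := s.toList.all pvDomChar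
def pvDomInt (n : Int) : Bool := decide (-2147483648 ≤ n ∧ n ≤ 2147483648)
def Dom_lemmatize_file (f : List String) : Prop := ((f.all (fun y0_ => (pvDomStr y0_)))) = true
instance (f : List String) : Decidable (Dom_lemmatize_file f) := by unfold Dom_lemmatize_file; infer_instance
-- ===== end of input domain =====

-- B replaces A's single 8-accumulator loop by a parse-then-count decomposition:
-- one pass collects the surviving records, then each statistic is an independent count over that list.


-- ===== PORT A =====
-- loop body of A for one line; on a line whose split does not have exactly 6 fields
-- Python raises ValueError (excluded by Pre_), the port leaves the state unchanged there
def pvStepA (st : Int × Int × Int × Int × Int × Int × Int × Int) (line : String) :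
    Int × Int × Int × Int × Int × Int × Int × Int :=
  let line := PySem.Str.rstrip line
  if line == "" then st
  else if PySem.Str.startswith line "<" && PySem.Str.endswith line ">" then st
  else
    let line := if PySem.Str.endswith line "\tCLARIFY" then PySem.Str.slice line none (some (-8)) else line
    match PySem.Str.split? line "\t" with
    | some [word, _pos, _udpos, norm_word, sur_lemma, norm_lemma] =>
      let (total, sur, norm, nw, sur_nc, norm_nc, nw_nc, nl) := st
      let total := total + 1
      let sur_nc := if PySem.Str.lower word == PySem.Str.lower sur_lemma then sur_nc + 1 else sur_nc
      let sur := if word == sur_lemma then sur + 1 else sur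
      let norm_nc := if PySem.Str.lower word == PySem.Str.lower norm_lemma then norm_nc + 1 else norm_nc
      let norm := if word == norm_lemma then norm + 1 else norm
      let nw_nc := if PySem.Str.lower word == PySem.Str.lower norm_word then nw_nc + 1 else nw_nc
      let nw := if word == norm_word then nw + 1 else nw
      let nl := if norm_word == norm_lemma then nl + 1 else nl
      (total, sur, norm, nw, sur_nc, norm_nc, nw_nc, nl)
    | _ => st  -- Python: ValueError

def lemmatize_file (f : List String) : Int × Int × Int × Int × Int × Int × Int × Int :=
  f.foldl pvStepA (0, 0, 0, 0, 0, 0, 0, 0)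

-- ===== PORT B =====
-- pass 1: parse one line into a record (word, norm_word, sur_lemma, norm_lemma);
-- none = skipped line (or Python's ValueError on a malformed line, excluded by Pre_)
def pvParse (line : String) : Option (String × String × String × String) :=
  let line := PySem.Str.rstrip line
  if line == "" then none
  else if PySem.Str.startswith line "<" && PySem.Str.endswith line ">" then none
  else
    let line := if PySem.Str.endswith line "\tCLARIFY" then PySem.Str.slice line none (some (-8)) else line
    match PySem.Str.split? line "\t" with
    | some [word, _pos, _udpos, norm_word, sur_lemma, norm_lemma] => some (word, norm_word, sur_lemma, norm_lemma)
    | _ => none  -- Python: ValueError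

def lemmatize_file_alt (f : List String) : Int × Int × Int × Int × Int × Int × Int × Int :=
  let recs := f.filterMap pvParse
  ((recs.length : Int),
   (recs.countP (fun r => r.1 == r.2.2.1) : Int),
   (recs.countP (fun r => r.1 == r.2.2.2) : Int),
   (recs.countP (fun r => r.1 == r.2.1) : Int),
   (recs.countP (fun r => PySem.Str.lower r.1 == PySem.Str.lower r.2.2.1) : Int),
   (recs.countP (fun r => PySem.Str.lower r.1 == PySem.Str.lower r.2.2.2) : Int),
   (recs.countP (fun r => PySem.Str.lower r.1 == PySem.Str.lower r.2.1) : Int),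
   (recs.countP (fun r => r.2.1 == r.2.2.2) : Int))

-- ===== PRECONDITION & SPEC =====
-- Pre_ excludes exactly the inputs on which Python A raises ValueError: a non-skipped
-- line that does not split into exactly 6 tab-separated fields
def Pre_lemmatize_file (f : List String) : Prop :=
  ∀ line ∈ f,
    let s := PySem.Str.rstrip line
    s ≠ "" →
    ¬(PySem.Str.startswith s "<" = true ∧ PySem.Str.endswith s ">" = true) →
    ((PySem.Str.split? (if PySem.Str.endswith s "\tCLARIFY" then PySem.Str.slice s none (some (-8)) else s) "\t").getD []).length = 6
instance (f : List String) : Decidable (Pre_lemmatize_file f) := by unfold Pre_lemmatize_file; infer_instance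

def pvWitness_lemmatize_file : List String :=
  ["Hunde\tNN\tNOUN\tHunde\thund\tHund", "", "<posting id=\"1\"/>", "geh\tVV\tVERB\tgehe\tgeh\tgehen\tCLARIFY"]

def Spec_lemmatize_file (f : List String) (out : Int × Int × Int × Int × Int × Int × Int × Int) : Prop := out = lemmatize_file_alt f
instance (f : List String) (out : Int × Int × Int × Int × Int × Int × Int × Int) : Decidable (Spec_lemmatize_file f out) := by
  unfold Spec_lemmatize_file
  exact @instDecidableEqProd _ _ _ (@instDecidableEqProd _ _ _ (@instDecidableEqProd _ _ _
    (@instDecidableEqProd _ _ _ (@instDecidableEqProd _ _ _ (@instDecidableEqProd _ _ _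
      (@instDecidableEqProd _ _ _ inferInstance)))))) _ _

-- ===== CLAIM (what is proved, stated in full; the proofs are below) =====
def Claim_equal_lemmatize_file : Prop := ∀ (f : List String), Dom_lemmatize_file f → Pre_lemmatize_file f → Spec_lemmatize_file f (lemmatize_file f)

-- ===== LEMMAS AND PROOFS =====

-- record-level bump, the common denominator of the two ports
def pvBump (st : Int × Int × Int × Int × Int × Int × Int × Int) (r : String × String × String × String) :
    Int × Int × Int × Int × Int × Int × Int × Int :=
  (st.1 + 1,
   st.2.1 + (if r.1 == r.2.2.1 then 1 else 0),
   st.2.2.1 + (if r.1 == r.2.2.2 then 1 else 0),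
   st.2.2.2.1 + (if r.1 == r.2.1 then 1 else 0),
   st.2.2.2.2.1 + (if PySem.Str.lower r.1 == PySem.Str.lower r.2.2.1 then 1 else 0),
   st.2.2.2.2.2.1 + (if PySem.Str.lower r.1 == PySem.Str.lower r.2.2.2 then 1 else 0),
   st.2.2.2.2.2.2.1 + (if PySem.Str.lower r.1 == PySem.Str.lower r.2.1 then 1 else 0),
   st.2.2.2.2.2.2.2 + (if r.2.1 == r.2.2.2 then 1 else 0))

set_option maxHeartbeats 1000000 in
lemma pvStepA_eq (st : Int × Int × Int × Int × Int × Int × Int × Int) (line : String) :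
    pvStepA st line = match pvParse line with
      | none => st
      | some r => pvBump st r := by
  obtain ⟨t, s, n, w, snc, nnc, wnc, nl⟩ := st
  unfold pvStepA pvParse
  dsimp only
  generalize PySem.Str.rstrip line = L
  split_ifs with h1 h2 h3 <;> try rfl
  all_goals (split <;> try rfl)
  all_goals simp only [pvBump, Prod.mk.injEq]
  all_goals refine ⟨trivial, ?_, ?_, ?_, ?_, ?_, ?_, ?_⟩
  all_goals split_ifs <;> omega

lemma pvFold_eq (recs : List (String × String × String × String))
    (st : Int × Int × Int × Int × Int × Int × Int × Int) :
    recs.foldl pvBump st =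
      (st.1 + recs.length,
       st.2.1 + recs.countP (fun r => r.1 == r.2.2.1),
       st.2.2.1 + recs.countP (fun r => r.1 == r.2.2.2),
       st.2.2.2.1 + recs.countP (fun r => r.1 == r.2.1),
       st.2.2.2.2.1 + recs.countP (fun r => PySem.Str.lower r.1 == PySem.Str.lower r.2.2.1),
       st.2.2.2.2.2.1 + recs.countP (fun r => PySem.Str.lower r.1 == PySem.Str.lower r.2.2.2),
       st.2.2.2.2.2.2.1 + recs.countP (fun r => PySem.Str.lower r.1 == PySem.Str.lower r.2.1),
       st.2.2.2.2.2.2.2 + recs.countP (fun r => r.2.1 == r.2.2.2)) := by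
  induction recs generalizing st with
  | nil => simp
  | cons r recs ih =>
    simp only [List.foldl_cons, ih, List.countP_cons, List.length_cons, pvBump]
    simp only [Prod.mk.injEq]
    refine ⟨?_, ?_, ?_, ?_, ?_, ?_, ?_, ?_⟩ <;> (try split_ifs) <;> push_cast <;> ring

lemma loopA_eq (f : List String) (st : Int × Int × Int × Int × Int × Int × Int × Int) :
    f.foldl pvStepA st = (f.filterMap pvParse).foldl pvBump st := by
  induction f generalizing st with
  | nil => rfl
  | cons line f ih =>
    simp only [List.foldl_cons, ih, List.filterMap_cons, pvStepA_eq]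
    cases pvParse line <;> simp

-- ===== VERDICT (by name: the statement is the Claim_ definition above) =====
theorem lemmatize_file_spec : Claim_equal_lemmatize_file := by
  intro f _ _
  show lemmatize_file f = lemmatize_file_alt f
  simp [lemmatize_file, lemmatize_file_alt, loopA_eq, pvFold_eq]
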